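-- pv_equiv track=rewrite | github.com/cbaziotis/ekphrasis | ekphrasis/utils/nlp.py | mark_doc
-- ===== SOURCE A (Python) =====
-- def mark_doc(doc, wids, mark=None, pos=None):
--     """
--     Given a list of words and a set of word positions, mark the words in those positions.
--     :param list doc: a list of words (strings)
--     :param set wids: the positions of the words to be marked
--     :param string mark: a string that sets the mark that will be applied
--                         to each of the selected words
--     :param string pos: can be one of {"prefix", "suffix"}
--     :return: the marked list of words
--     """
--     if mark is None:
--         mark = "NEG"
--
--     if pos is None:
--         pos = "suffix"
--
--     marked_doc = []
--
--     for i, tok in enumerate(doc):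
--         if i in wids:
--             if pos == "prefix":
--                 word = mark + "_" + tok
--             else:
--                 word = tok + "_" + mark
--             marked_doc.append(word)
--         else:
--             marked_doc.append(tok)
--
--     return marked_doc
-- ===== SOURCE B (Python) =====
-- def mark_doc(doc, wids, mark=None, pos=None):
--     if mark is None:
--         mark = "NEG"
--     if pos is None:
--         pos = "suffix"
--     prefix = (pos == "prefix")
--     marked_doc = list(doc)
--     for w in wids:
--         if 0 <= w < len(doc):
--             tok = doc[w]
--             marked_doc[w] = (mark + "_" + tok) if prefix else (tok + "_" + mark)
--     return marked_doc
-- ===== Notes on version B (the rewrite author's own statement) =====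
-- stated objective: alternative
-- what changed: B copies the document once and loops only over the positions in wids, updating the copy in place, instead of scanning every token and testing its index for membership in wids.
import Mathlib
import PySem

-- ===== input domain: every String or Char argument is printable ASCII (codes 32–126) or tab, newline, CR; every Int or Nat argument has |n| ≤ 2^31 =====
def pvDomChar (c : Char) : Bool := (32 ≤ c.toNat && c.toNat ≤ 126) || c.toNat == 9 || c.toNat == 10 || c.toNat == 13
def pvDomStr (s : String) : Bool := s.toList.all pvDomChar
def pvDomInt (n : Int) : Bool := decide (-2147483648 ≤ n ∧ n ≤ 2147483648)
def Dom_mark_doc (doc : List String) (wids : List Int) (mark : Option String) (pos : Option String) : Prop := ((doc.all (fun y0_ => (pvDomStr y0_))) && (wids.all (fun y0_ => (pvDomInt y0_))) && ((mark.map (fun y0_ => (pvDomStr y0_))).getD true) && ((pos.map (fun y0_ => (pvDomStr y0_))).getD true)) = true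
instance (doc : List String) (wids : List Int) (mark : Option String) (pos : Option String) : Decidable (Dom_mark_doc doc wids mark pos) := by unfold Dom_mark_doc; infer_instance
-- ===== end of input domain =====

-- B copies the document once and loops only over the positions in wids, updating the copy
-- in place, instead of A's scan of every token with a membership test; no argument is mutated.

-- ===== PORT A =====
-- literal port of A: scan enumerate(doc), test `i in wids` for each token
def mark_doc (doc : List String) (wids : List Int) (mark : Option String) (pos : Option String) : List String :=
  let mark := mark.getD "NEG"
  let pos := pos.getD "suffix"
  (PySem.List.enumerate doc).foldl
    (fun acc p =>
      if p.1 ∈ wids then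
        acc ++ [if pos = "prefix" then mark ++ "_" ++ p.2 else p.2 ++ "_" ++ mark]
      else
        acc ++ [p.2]) []

-- ===== PORT B =====
-- literal port of B: copy doc, then for each w in wids overwrite position w if in range
def mark_doc_alt (doc : List String) (wids : List Int) (mark : Option String) (pos : Option String) : List String :=
  let m := mark.getD "NEG"
  let p := pos.getD "suffix"
  let pfx : Bool := p = "prefix"
  wids.foldl
    (fun acc w =>
      if 0 ≤ w ∧ w < (doc.length : Int) then
        acc.set w.toNat
          (if pfx then m ++ "_" ++ doc.getD w.toNat "" else doc.getD w.toNat "" ++ "_" ++ m)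
      else acc) doc

-- ===== PRECONDITION & SPEC =====
def Spec_mark_doc (doc : List String) (wids : List Int) (mark : Option String) (pos : Option String) (out : List String) : Prop := out = mark_doc_alt doc wids mark pos
instance (doc : List String) (wids : List Int) (mark : Option String) (pos : Option String) (out : List String) : Decidable (Spec_mark_doc doc wids mark pos out) := by unfold Spec_mark_doc; infer_instance

-- ===== CLAIM (what is proved, stated in full; the proofs are below) =====
def Claim_equal_mark_doc : Prop := ∀ (doc : List String) (wids : List Int) (mark : Option String) (pos : Option String), Dom_mark_doc doc wids mark pos → Spec_mark_doc doc wids mark pos (mark_doc doc wids mark pos)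

-- ===== LEMMAS AND PROOFS =====

-- the marked form of the token at position i (with defaults already resolved)
def pvMk (doc : List String) (m p : String) (i : Nat) : String :=
  if (p = "prefix" : Bool) then m ++ "_" ++ doc.getD i "" else doc.getD i "" ++ "_" ++ m

theorem length_altFold (doc : List String) (m p : String) (ws : List Int) (acc : List String) :
    (ws.foldl (fun acc w =>
      if 0 ≤ w ∧ w < (doc.length : Int) then
        acc.set w.toNat (if (p = "prefix" : Bool) then m ++ "_" ++ doc.getD w.toNat "" else doc.getD w.toNat "" ++ "_" ++ m)
      else acc) acc).length = acc.length := by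
  induction ws generalizing acc with
  | nil => rfl
  | cons w ws ih =>
    rw [List.foldl_cons, ih]
    split <;> simp

theorem getElem?_altFold (doc : List String) (m p : String) (ws : List Int) (acc : List String)
    (hlen : acc.length = doc.length) (i : Nat) (hi : i < doc.length) :
    (ws.foldl (fun acc w =>
      if 0 ≤ w ∧ w < (doc.length : Int) then
        acc.set w.toNat (if (p = "prefix" : Bool) then m ++ "_" ++ doc.getD w.toNat "" else doc.getD w.toNat "" ++ "_" ++ m)
      else acc) acc)[i]? =
    if (i : Int) ∈ ws then some (pvMk doc m p i) else acc[i]? := by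
  induction ws generalizing acc with
  | nil => simp
  | cons w ws ih =>
    rw [List.foldl_cons, ih _ (by split <;> simp [hlen])]
    by_cases hmem : (i : Int) ∈ ws
    · simp [hmem]
    · rw [if_neg hmem]
      by_cases hw : (i : Int) = w
      · have hmemc : (i : Int) ∈ w :: ws := by simp [hw]
        have hg : (0 : Int) ≤ w ∧ w < (doc.length : Int) := by
          constructor <;> omega
        rw [if_pos hg, if_pos hmemc]
        have hwt : w.toNat = i := by omega
        rw [hwt, List.getElem?_set_self (by omega)]
        simp [pvMk]
      · have hmemc : (i : Int) ∉ w :: ws := by simp [hw, hmem]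
        rw [if_neg hmemc]
        by_cases hg : (0 : Int) ≤ w ∧ w < (doc.length : Int)
        · rw [if_pos hg]
          apply List.getElem?_set_ne
          omega
        · rw [if_neg hg]

theorem markA_eq_map (doc : List String) (wids : List Int) (m p : String) :
    ((PySem.List.enumerate doc).foldl
      (fun acc q =>
        if q.1 ∈ wids then
          acc ++ [if p = "prefix" then m ++ "_" ++ q.2 else q.2 ++ "_" ++ m]
        else acc ++ [q.2]) []) =
    (PySem.List.enumerate doc).map
      (fun q => if q.1 ∈ wids then (if p = "prefix" then m ++ "_" ++ q.2 else q.2 ++ "_" ++ m) else q.2) := by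
  have hfun : (fun (acc : List String) (q : Int × String) =>
        if q.1 ∈ wids then acc ++ [if p = "prefix" then m ++ "_" ++ q.2 else q.2 ++ "_" ++ m]
        else acc ++ [q.2]) =
      (fun acc q => acc ++ [if q.1 ∈ wids then (if p = "prefix" then m ++ "_" ++ q.2 else q.2 ++ "_" ++ m) else q.2]) := by
    funext acc q
    split <;> rfl
  rw [hfun]
  simpa using PySem.List.foldl_append_singleton_eq_map
    (l := PySem.List.enumerate doc)
    (f := fun q => if q.1 ∈ wids then (if p = "prefix" then m ++ "_" ++ q.2 else q.2 ++ "_" ++ m) else q.2)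
    (acc := ([] : List String))

theorem mark_doc_spec : Claim_equal_mark_doc := by
  intro doc wids mark pos _
  unfold Spec_mark_doc mark_doc mark_doc_alt
  simp only []
  set m := mark.getD "NEG" with hm
  set p := pos.getD "suffix" with hp
  rw [markA_eq_map]
  apply List.ext_getElem?
  intro i
  by_cases hi : i < doc.length
  · rw [getElem?_altFold doc m p wids doc rfl i hi]
    rw [List.getElem?_map, PySem.List.getElem?_enumerate]
    have hdoc : doc[i]? = some doc[i] := List.getElem?_eq_getElem hi
    rw [hdoc]
    simp only [Option.map_some, Int.zero_add]
    by_cases hmem : (i : Int) ∈ wids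
    · simp only [hmem, if_pos, pvMk]
      have hgd : doc.getD i "" = doc[i] := by simp [List.getD, hdoc]
      rw [hgd]
      split <;> simp_all
    · simp [hmem]
  · rw [List.getElem?_eq_none (by simp [PySem.List.length_enumerate]; omega),
        List.getElem?_eq_none (by rw [length_altFold]; omega)]
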